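-- pv_equiv track=rewrite | github.com/i-am-pierre/LTCBSP | Magnus/magnus.py | honi_count
-- ===== SOURCE A (Python) =====
-- def honi_count(word:str):
--     count = 0
--     has_h = False
--     has_o = False
--     has_n = False
--     has_i = False
--     for char in word:
--         if char == 'H':
--             has_h = True
--         elif has_h and char == 'O':
--             has_o = True
--         elif has_h and has_o and char == 'N':
--             has_n = True
--         elif has_h and has_o and has_n and char == 'I':
--             count = count + 1
--             has_h = False
--             has_o = False
--             has_n = False
--             has_i = False
--     return count
-- ===== SOURCE B (Python) =====
-- def honi_count(word: str):
--     # Jump-based search: repeatedly locate the next 'H', 'O', 'N', 'I' in order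
--     # with str.find, instead of scanning char-by-char with a state machine.
--     count = 0
--     pos = 0
--     while True:
--         for ch in "HONI":
--             pos = word.find(ch, pos)
--             if pos == -1:
--                 return count
--             pos += 1
--         count += 1
-- ===== Notes on version B (the rewrite author's own statement) =====
-- stated objective: faster
-- what changed: Replaces A's char-by-char scan with four unrolled stage booleans by repeated str.find jumps that locate the next 'H', 'O', 'N', 'I' in order and count completed rounds.
import Mathlib
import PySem

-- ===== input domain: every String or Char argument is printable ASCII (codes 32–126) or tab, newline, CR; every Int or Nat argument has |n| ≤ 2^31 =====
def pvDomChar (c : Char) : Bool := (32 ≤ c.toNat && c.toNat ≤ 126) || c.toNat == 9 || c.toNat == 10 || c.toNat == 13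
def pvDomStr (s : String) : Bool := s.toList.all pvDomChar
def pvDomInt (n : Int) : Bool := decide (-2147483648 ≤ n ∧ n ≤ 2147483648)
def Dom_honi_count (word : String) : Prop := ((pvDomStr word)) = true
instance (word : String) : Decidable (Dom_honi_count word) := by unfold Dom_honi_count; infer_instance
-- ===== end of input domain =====

-- B replaces A's char-by-char boolean state machine by repeated str.find jumps:
-- it locates the next pattern character in order and continues past each match
-- (objective: faster by a constant factor, measured).

-- ===== PORT A =====
-- state: (count, has_h, has_o, has_n, has_i)
def honiStepA (s : Int × Bool × Bool × Bool × Bool) (char : Char) : Int × Bool × Bool × Bool × Bool :=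
  let (count, has_h, has_o, has_n, has_i) := s
  if char = 'H' then (count, true, has_o, has_n, has_i)
  else if has_h && char = 'O' then (count, has_h, true, has_n, has_i)
  else if has_h && has_o && char = 'N' then (count, has_h, has_o, true, has_i)
  else if has_h && has_o && has_n && char = 'I' then (count + 1, false, false, false, false)
  else s

def honi_count (word : String) : Int :=
  (word.toList.foldl honiStepA (0, false, false, false, false)).1

-- ===== PORT B =====
-- word.find(ch, pos): first index ≥ pos holding ch; Python's -1 is rendered as none
def honiFind (cs : List Char) (c : Char) (pos : Nat) : Option Nat :=
  if h : pos < cs.length then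
    (if cs[pos] = c then some pos else honiFind cs c (pos + 1))
  else none
termination_by cs.length - pos

-- the inner `for ch in "HONI"` loop: advance pos through one full round, none = early return
def honiAdvance (cs : List Char) : List Char → Nat → Option Nat
  | [], pos => some pos
  | t :: ts, pos =>
    match honiFind cs t pos with
    | none => none
    | some p => honiAdvance cs ts (p + 1)

theorem honiFind_bounds (cs : List Char) (c : Char) : ∀ pos p, honiFind cs c pos = some p → pos ≤ p ∧ p < cs.length := by
  intro pos p h
  induction pos using honiFind.induct cs c with
  | case1 pos hlt heq =>
    rw [honiFind, dif_pos hlt, if_pos heq] at h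
    cases h
    exact ⟨le_refl _, hlt⟩
  | case2 pos hlt hne ih =>
    rw [honiFind, dif_pos hlt, if_neg hne] at h
    have := ih h; omega
  | case3 pos hge => rw [honiFind, dif_neg hge] at h; cases h

theorem honiAdvance_lt (cs : List Char) : ∀ ts t pos p, honiAdvance cs (t :: ts) pos = some p → pos < p ∧ p ≤ cs.length := by
  intro ts
  induction ts with
  | nil =>
    intro t pos p h
    unfold honiAdvance at h
    cases hf : honiFind cs t pos with
    | none => rw [hf] at h; cases h
    | some q =>
      rw [hf] at h
      have := honiFind_bounds cs t pos q hf
      simp [honiAdvance] at h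
      omega
  | cons t' ts ih =>
    intro t pos p h
    unfold honiAdvance at h
    cases hf : honiFind cs t pos with
    | none => rw [hf] at h; cases h
    | some q =>
      rw [hf] at h
      have h1 := honiFind_bounds cs t pos q hf
      have h2 := ih t' (q + 1) p h
      omega

-- the outer `while True` loop
def honiLoop (cs : List Char) (pos : Nat) (count : Int) : Int :=
  match h : honiAdvance cs ('H' :: 'O' :: 'N' :: 'I' :: []) pos with
  | none => count
  | some p => honiLoop cs p (count + 1)
termination_by cs.length + 1 - pos
decreasing_by
  have := honiAdvance_lt cs _ _ _ _ h; omega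

def honi_count_alt (word : String) : Int := honiLoop word.toList 0 0

-- ===== PRECONDITION & SPEC =====
def Spec_honi_count (word : String) (out : Int) : Prop := out = honi_count_alt word
instance (word : String) (out : Int) : Decidable (Spec_honi_count word out) := by unfold Spec_honi_count; infer_instance

-- ===== CLAIM (what is proved, stated in full; the proofs are below) =====
def Claim_equal_honi_count : Prop := ∀ (word : String), Dom_honi_count word → Spec_honi_count word (honi_count word)

-- ===== LEMMAS AND PROOFS =====

-- reference stage machine: stage s ∈ {0,1,2,3} = how much of "HONI" is matched
def honiTarget (s : Nat) : Char :=
  if s = 0 then 'H' else if s = 1 then 'O' else if s = 2 then 'N' else 'I'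

def honiRef : List Char → Nat → Int
  | [], _ => 0
  | c :: cs, s =>
    if c = honiTarget s then (if s = 3 then 1 + honiRef cs 0 else honiRef cs (s + 1))
    else honiRef cs s

-- A's fold computes honiRef
theorem foldA_eq_ref (cs : List Char) : ∀ (count : Int) (s : Nat),
    s = 0 ∨ s = 1 ∨ s = 2 ∨ s = 3 →
    (cs.foldl honiStepA (count, decide (1 ≤ s), decide (2 ≤ s), decide (3 ≤ s), false)).1
      = count + honiRef cs s := by
  induction cs with
  | nil => intro count s _; simp [honiRef]
  | cons c cs ih =>
    intro count s hs
    have ih0 := fun c => ih c 0 (by tauto)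
    have ih1 := fun c => ih c 1 (by tauto)
    have ih2 := fun c => ih c 2 (by tauto)
    have ih3 := fun c => ih c 3 (by tauto)
    clear ih
    rcases hs with rfl | rfl | rfl | rfl <;>
      by_cases hH : c = 'H' <;> by_cases hO : c = 'O' <;>
      by_cases hN : c = 'N' <;> by_cases hI : c = 'I' <;>
      (simp_all [List.foldl, honiStepA, honiRef, honiTarget]; try omega)

-- skipping non-target chars: honiRef on a suffix is determined by the next find
theorem ref_skip (cs : List Char) (s : Nat) : ∀ pos,
    honiRef (cs.drop pos) s =
      match honiFind cs (honiTarget s) pos with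
      | none => 0
      | some p => (if s = 3 then 1 + honiRef (cs.drop (p + 1)) 0 else honiRef (cs.drop (p + 1)) (s + 1)) := by
  intro pos
  induction pos using honiFind.induct cs (honiTarget s) with
  | case1 pos hlt heq =>
    rw [honiFind, dif_pos hlt, if_pos heq]
    rw [List.drop_eq_getElem_cons hlt]
    simp [honiRef, heq]
  | case2 pos hlt hne ih =>
    rw [honiFind, dif_pos hlt, if_neg hne]
    rw [List.drop_eq_getElem_cons hlt]
    simp only [honiRef, if_neg hne]
    rw [ih]
  | case3 pos hge =>
    rw [honiFind, dif_neg hge]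
    rw [List.drop_eq_nil_of_le (by omega)]
    rfl

theorem honiLoop_none (cs : List Char) (pos : Nat) (count : Int)
    (h : honiAdvance cs ('H' :: 'O' :: 'N' :: 'I' :: []) pos = none) :
    honiLoop cs pos count = count := by
  rw [honiLoop]; split <;> simp_all

theorem honiLoop_some (cs : List Char) (pos : Nat) (count : Int) (p : Nat)
    (h : honiAdvance cs ('H' :: 'O' :: 'N' :: 'I' :: []) pos = some p) :
    honiLoop cs pos count = honiLoop cs p (count + 1) := by
  rw [honiLoop]; split <;> simp_all

-- the four stage-skip equations, chained: one round of B equals four stages of honiRef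
theorem ref_round (cs : List Char) (pos : Nat) :
    honiRef (cs.drop pos) 0 =
      match honiAdvance cs ('H' :: 'O' :: 'N' :: 'I' :: []) pos with
      | none => 0
      | some p => 1 + honiRef (cs.drop p) 0 := by
  have r0 := ref_skip cs 0 pos
  rw [show honiTarget 0 = 'H' from rfl] at r0
  cases h1 : honiFind cs 'H' pos with
  | none => simp only [honiAdvance, h1]; rw [h1] at r0; simpa using r0
  | some p1 =>
    rw [h1] at r0; simp at r0
    have r1 := ref_skip cs 1 (p1 + 1)
    rw [show honiTarget 1 = 'O' from rfl] at r1
    cases h2 : honiFind cs 'O' (p1 + 1) with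
    | none =>
      simp only [honiAdvance, h1, h2]; rw [r0]; rw [h2] at r1; simpa using r1
    | some p2 =>
      rw [h2] at r1; simp at r1
      have r2 := ref_skip cs 2 (p2 + 1)
      rw [show honiTarget 2 = 'N' from rfl] at r2
      cases h3 : honiFind cs 'N' (p2 + 1) with
      | none =>
        simp only [honiAdvance, h1, h2, h3]; rw [r0, r1]; rw [h3] at r2; simpa using r2
      | some p3 =>
        rw [h3] at r2; simp at r2
        have r3 := ref_skip cs 3 (p3 + 1)
        rw [show honiTarget 3 = 'I' from rfl] at r3
        cases h4 : honiFind cs 'I' (p3 + 1) with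
        | none =>
          simp only [honiAdvance, h1, h2, h3, h4]; rw [r0, r1, r2]; rw [h4] at r3; simpa using r3
        | some p4 =>
          rw [h4] at r3; simp at r3
          simp only [honiAdvance, h1, h2, h3, h4]
          rw [r0, r1, r2, r3]

-- B's loop computes honiRef
theorem loop_eq_ref (cs : List Char) (pos : Nat) (count : Int) :
    honiLoop cs pos count = count + honiRef (cs.drop pos) 0 := by
  induction pos, count using honiLoop.induct cs with
  | case1 pos count hadv =>
    rw [honiLoop_none cs pos count hadv]
    have := ref_round cs pos
    rw [hadv] at this
    simp [this]
  | case2 pos count p hadv ih =>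
    rw [honiLoop_some cs pos count p hadv, ih]
    have := ref_round cs pos
    rw [hadv] at this
    rw [this]; ring

-- ===== VERDICT (by name: the statement is the Claim_ definition above) =====
theorem honi_count_spec : Claim_equal_honi_count := by
  intro word _
  unfold Spec_honi_count honi_count honi_count_alt
  rw [loop_eq_ref word.toList 0 0, List.drop_zero]
  simpa using foldA_eq_ref word.toList 0 0 (by tauto)
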